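-- pv_equiv track=rewrite | github.com/voschezang/mash | src/mash/util.py | list_prefix_matches
-- ===== SOURCE A (Python) =====
-- from typing import Any, Callable, Dict, Generator, Iterable, List, MappingView, Sequence, Tuple, TypeVar, Union
--
-- def list_prefix_matches(element: str, elements: List[str]):
--     """Yields all elements that are equal to a prefix of `element`.
--     Elements with better matches are chosen first.
--     """
--     prev_matches = set()
--     for i in range(max(1, len(element)), 0, -1):
--         prefix = element[:i]
--         for other in elements:
--             if other in prev_matches:
--                 continue
--
--             if other.startswith(prefix):
--                 prev_matches |= {other}
--                 yield other
-- ===== SOURCE B (Python) =====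
-- def list_prefix_matches(element, elements):
--     """Yields all elements that are equal to a prefix of `element`, best
--     (longest) prefix matches first; each distinct element once, first
--     occurrences in order, stable within equal match lengths."""
--     def match_len(other):
--         if not element:
--             return 1  # the empty prefix matches everything
--         n = 0
--         for a, b in zip(element, other):
--             if a != b:
--                 break
--             n += 1
--         return n
--
--     seen = set()
--     candidates = []
--     for other in elements:
--         if other not in seen:
--             seen.add(other)
--             k = match_len(other)
--             if k > 0:
--                 candidates.append((k, other))
--     candidates.sort(key=lambda t: -t[0])
--     for _, other in candidates:
--         yield other
-- ===== Notes on version B (the rewrite author's own statement) =====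
-- stated objective: faster
-- what changed: A re-scans the whole list once per prefix length (testing startswith for every prefix, longest first, with a seen-set to skip earlier matches); B makes one pass that dedupes and computes each element's common-prefix length, then does a single stable sort by descending length.
import Mathlib
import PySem

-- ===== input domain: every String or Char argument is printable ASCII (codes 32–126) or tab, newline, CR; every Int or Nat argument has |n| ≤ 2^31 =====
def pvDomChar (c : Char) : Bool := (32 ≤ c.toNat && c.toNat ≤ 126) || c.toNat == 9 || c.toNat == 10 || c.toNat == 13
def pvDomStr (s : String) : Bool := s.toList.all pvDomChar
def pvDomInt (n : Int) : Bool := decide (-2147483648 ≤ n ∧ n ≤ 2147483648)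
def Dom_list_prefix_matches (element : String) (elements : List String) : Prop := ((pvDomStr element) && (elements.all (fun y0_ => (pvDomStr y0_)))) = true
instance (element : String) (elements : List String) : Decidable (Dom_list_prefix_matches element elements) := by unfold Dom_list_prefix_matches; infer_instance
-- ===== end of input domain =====

-- B replaces A's rescan per prefix length (longest first, startswith against the whole list each
-- round) by one pass that scores each distinct element with its matched-prefix length plus one
-- stable sort by descending score; objective: faster. Both Pythons are generators; the claim is
-- about the fully materialised output sequence.

-- ===== PORT A =====
-- inner loop body of A: one candidate `other` tested against the current prefix
def aInner (pfx : String) (st : PySem.Set String × List String) (other : String) :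
    PySem.Set String × List String :=
  if PySem.Set.contains st.1 other then st
  else if PySem.Str.startswith other pfx then (PySem.Set.add st.1 other, st.2 ++ [other])
  else st

def list_prefix_matches (element : String) (elements : List String) : List String :=
  ((PySem.List.pyRange (max 1 (PySem.Str.len element)) 0 (-1)).foldl
    (fun st i => elements.foldl (aInner (PySem.Str.slice element none (some i))) st)
    ((PySem.Set.empty : PySem.Set String), ([] : List String))).2

-- ===== PORT B =====
-- match_len: leading characters of `other` agreeing with `element`; 1 if `element` is empty
def cplAux : List (Char × Char) → Nat
  | [] => 0
  | (a, b) :: t => if a = b then cplAux t + 1 else 0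

def matchLen (element other : String) : Nat :=
  if element.toList = [] then 1 else cplAux (element.toList.zip other.toList)

-- loop body of B's single pass: dedupe and score
def bStep (element : String) (st : PySem.Set String × List (Nat × String)) (other : String) :
    PySem.Set String × List (Nat × String) :=
  if PySem.Set.contains st.1 other then st
  else
    let seen := PySem.Set.add st.1 other
    let k := matchLen element other
    if k > 0 then (seen, st.2 ++ [(k, other)]) else (seen, st.2)

def list_prefix_matches_alt (element : String) (elements : List String) : List String :=
  let cand := (elements.foldl (bStep element)
    ((PySem.Set.empty : PySem.Set String), ([] : List (Nat × String)))).2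
  (PySem.List.sorted cand (fun t => -(t.1 : Int)) false).map (fun t => t.2)

-- ===== PRECONDITION & SPEC =====
def Spec_list_prefix_matches (element : String) (elements : List String) (out : List String) : Prop := out = list_prefix_matches_alt element elements
instance (element : String) (elements : List String) (out : List String) : Decidable (Spec_list_prefix_matches element elements out) := by unfold Spec_list_prefix_matches; infer_instance

-- ===== CLAIM (what is proved, stated in full; the proofs are below) =====
def Claim_equal_list_prefix_matches : Prop := ∀ (element : String) (elements : List String), Dom_list_prefix_matches element elements → Spec_list_prefix_matches element elements (list_prefix_matches element elements)

-- ===== LEMMAS AND PROOFS =====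

-- `fresh seen xs`: the first occurrences of the elements of xs not in `seen`, in order
def fresh {α : Type} [BEq α] (seen : PySem.Set α) : List α → List α
  | [] => []
  | o :: t =>
    if PySem.Set.contains seen o then fresh seen t else o :: fresh (PySem.Set.add seen o) t

theorem pv_contains_true {α : Type} [BEq α] [LawfulBEq α] {s : PySem.Set α} {x : α}
    (h : x ∈ s) : PySem.Set.contains s x = true := (PySem.Set.contains_iff s x).2 h

theorem pv_contains_false {α : Type} [BEq α] [LawfulBEq α] {s : PySem.Set α} {x : α}
    (h : x ∉ s) : PySem.Set.contains s x = false := by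
  cases hc : PySem.Set.contains s x
  · rfl
  · exact absurd ((PySem.Set.contains_iff s x).1 hc) h

theorem mem_fresh {α : Type} [BEq α] [LawfulBEq α] (xs : List α) (seen : PySem.Set α) (x : α)
    (hx : x ∈ fresh seen xs) : x ∈ xs ∧ x ∉ seen := by
  induction xs generalizing seen with
  | nil => simp [fresh] at hx
  | cons o t ih =>
    rw [fresh] at hx
    by_cases h : o ∈ seen
    · rw [pv_contains_true h] at hx
      simp only [reduceIte] at hx
      rcases ih _ hx with ⟨h1, h2⟩
      exact ⟨List.mem_cons_of_mem _ h1, h2⟩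
    · rw [pv_contains_false h] at hx
      simp only [Bool.false_eq_true, reduceIte, List.mem_cons] at hx
      rcases hx with rfl | hx
      · exact ⟨List.mem_cons_self, h⟩
      · rcases ih _ hx with ⟨h1, h2⟩
        refine ⟨List.mem_cons_of_mem _ h1, fun hm => h2 ?_⟩
        exact (PySem.Set.mem_add _ _ _).2 (Or.inl hm)

theorem fresh_filter_congr {α : Type} [BEq α] [LawfulBEq α] (q : α → Bool) (xs : List α)
    (s1 s2 : PySem.Set α) (h : ∀ x, q x = true → (x ∈ s1 ↔ x ∈ s2)) :
    (fresh s1 xs).filter q = (fresh s2 xs).filter q := by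
  induction xs generalizing s1 s2 with
  | nil => rfl
  | cons o t ih =>
    have haddL : ∀ x, q x = true → (x ∈ PySem.Set.add s1 o ↔ x ∈ PySem.Set.add s2 o) := by
      intro x hqx
      simp only [PySem.Set.mem_add]
      exact or_congr (h x hqx) Iff.rfl
    rw [fresh, fresh]
    by_cases hq : q o = true
    · have hmem : o ∈ s1 ↔ o ∈ s2 := h o hq
      by_cases h1 : o ∈ s1
      · rw [pv_contains_true h1, pv_contains_true (hmem.1 h1)]
        simp only [reduceIte]
        exact ih s1 s2 h
      · have h2 : o ∉ s2 := fun hm => h1 (hmem.2 hm)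
        rw [pv_contains_false h1, pv_contains_false h2]
        simp only [Bool.false_eq_true, reduceIte, List.filter_cons, hq]
        rw [ih _ _ haddL]
    · have hq' : q o = false := by simpa using hq
      have hmixL : ∀ x, q x = true → (x ∈ s1 ↔ x ∈ PySem.Set.add s2 o) := by
        intro x hqx
        have hxo : x ≠ o := fun e => by rw [e, hq'] at hqx; cases hqx
        simp only [PySem.Set.mem_add]
        rw [h x hqx]
        exact ⟨Or.inl, fun hx => hx.resolve_right hxo⟩
      have hmixR : ∀ x, q x = true → (x ∈ PySem.Set.add s1 o ↔ x ∈ s2) := by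
        intro x hqx
        have hxo : x ≠ o := fun e => by rw [e, hq'] at hqx; cases hqx
        simp only [PySem.Set.mem_add]
        rw [← h x hqx]
        exact ⟨fun hx => hx.resolve_right hxo, Or.inl⟩
      by_cases h1 : o ∈ s1 <;> by_cases h2 : o ∈ s2
      · rw [pv_contains_true h1, pv_contains_true h2]
        simp only [reduceIte]
        exact ih s1 s2 h
      · rw [pv_contains_true h1, pv_contains_false h2]
        simp only [Bool.false_eq_true, reduceIte, List.filter_cons, hq']
        exact ih _ _ hmixL
      · rw [pv_contains_false h1, pv_contains_true h2]
        simp only [Bool.false_eq_true, reduceIte, List.filter_cons, hq']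
        exact ih _ _ hmixR
      · rw [pv_contains_false h1, pv_contains_false h2]
        simp only [Bool.false_eq_true, reduceIte, List.filter_cons, hq']
        exact ih _ _ haddL

def aseen (pfx : String) : List String → PySem.Set String → PySem.Set String
  | [], seen => seen
  | o :: t, seen =>
    if PySem.Set.contains seen o then aseen pfx t seen
    else if PySem.Str.startswith o pfx then aseen pfx t (PySem.Set.add seen o)
    else aseen pfx t seen

theorem innerA (pfx : String) (xs : List String) (seen : PySem.Set String) (out : List String) :
    xs.foldl (aInner pfx) (seen, out)
      = (aseen pfx xs seen,
         out ++ (fresh seen xs).filter (fun o => PySem.Str.startswith o pfx)) := by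
  induction xs generalizing seen out with
  | nil => simp [aseen, fresh]
  | cons o t ih =>
    rw [List.foldl_cons, aseen, fresh]
    by_cases hc : o ∈ seen
    · rw [show aInner pfx (seen, out) o = (seen, out) by
        rw [aInner, pv_contains_true hc]; simp only [reduceIte]]
      rw [pv_contains_true hc]
      simp only [reduceIte]
      exact ih seen out
    · rw [pv_contains_false hc]
      simp only [Bool.false_eq_true, reduceIte]
      by_cases hs : PySem.Str.startswith o pfx = true
      · rw [show aInner pfx (seen, out) o = (PySem.Set.add seen o, out ++ [o]) by
          rw [aInner, pv_contains_false hc]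
          simp only [Bool.false_eq_true, reduceIte, hs]]
        rw [hs]
        simp only [reduceIte]
        rw [ih, List.filter_cons]
        simp only [hs, reduceIte, List.append_assoc, List.singleton_append]
      · have hs' : PySem.Str.startswith o pfx = false := by simpa using hs
        rw [show aInner pfx (seen, out) o = (seen, out) by
          rw [aInner, pv_contains_false hc]
          simp only [Bool.false_eq_true, reduceIte, hs']]
        rw [hs']
        simp only [Bool.false_eq_true, reduceIte]
        rw [ih, List.filter_cons]
        simp only [hs', Bool.false_eq_true, reduceIte]
        congr 2
        refine fresh_filter_congr _ t _ _ fun x hqx => ?_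
        have hxo : x ≠ o := fun e => by rw [e, hs'] at hqx; cases hqx
        simp only [PySem.Set.mem_add]
        constructor
        · intro hx
          exact Or.inl hx
        · rintro (hx | rfl)
          · exact hx
          · exact absurd rfl hxo

theorem mem_aseen (pfx : String) (xs : List String) (seen : PySem.Set String) (x : String) :
    x ∈ aseen pfx xs seen ↔ x ∈ seen ∨ (x ∈ xs ∧ PySem.Str.startswith x pfx = true) := by
  induction xs generalizing seen with
  | nil => simp [aseen]
  | cons o t ih =>
    rw [aseen]
    by_cases hc : o ∈ seen
    · rw [pv_contains_true hc]
      simp only [reduceIte]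
      rw [ih, List.mem_cons]
      constructor
      · rintro (h | ⟨h1, h2⟩)
        · exact Or.inl h
        · exact Or.inr ⟨Or.inr h1, h2⟩
      · rintro (h | ⟨rfl | h1, h2⟩)
        · exact Or.inl h
        · exact Or.inl hc
        · exact Or.inr ⟨h1, h2⟩
    · rw [pv_contains_false hc]
      simp only [Bool.false_eq_true, reduceIte]
      by_cases hs : PySem.Str.startswith o pfx = true
      · rw [hs]
        simp only [reduceIte]
        rw [ih, List.mem_cons]
        simp only [PySem.Set.mem_add]
        constructor
        · rintro ((h | rfl) | ⟨h1, h2⟩)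
          · exact Or.inl h
          · exact Or.inr ⟨Or.inl rfl, hs⟩
          · exact Or.inr ⟨Or.inr h1, h2⟩
        · rintro (h | ⟨rfl | h1, h2⟩)
          · exact Or.inl (Or.inl h)
          · exact Or.inl (Or.inr rfl)
          · exact Or.inr ⟨h1, h2⟩
      · have hs' : PySem.Str.startswith o pfx = false := by simpa using hs
        rw [hs']
        simp only [Bool.false_eq_true, reduceIte]
        rw [ih, List.mem_cons]
        constructor
        · rintro (h | ⟨h1, h2⟩)
          · exact Or.inl h
          · exact Or.inr ⟨Or.inr h1, h2⟩
        · rintro (h | ⟨rfl | h1, h2⟩)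
          · exact Or.inl h
          · rw [h2] at hs'; cases hs'
          · exact Or.inr ⟨h1, h2⟩

def descN : Nat → List Nat
  | 0 => []
  | n + 1 => (n + 1) :: descN n

theorem mem_descN (n k : Nat) : k ∈ descN n ↔ 1 ≤ k ∧ k ≤ n := by
  induction n with
  | zero => simp [descN]; omega
  | succ m ih => rw [descN, List.mem_cons, ih]; omega

theorem pairwise_descN (n : Nat) : (descN n).Pairwise (fun a b => b < a) := by
  induction n with
  | zero => exact List.Pairwise.nil
  | succ m ih =>
    rw [descN]
    exact List.Pairwise.cons (fun k hk => by rw [mem_descN] at hk; omega) ih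

theorem pyRange_descN (n : Nat) :
    PySem.List.pyRange (n : Int) 0 (-1) = (descN n).map (fun k => Int.ofNat k) := by
  induction n with
  | zero => rw [PySem.List.pyRange_neg_one_eq_nil (by omega)]; rfl
  | succ m ih =>
    rw [PySem.List.pyRange_neg_one_cons (by omega), descN, List.map_cons]
    congr 1
    · rw [show ((m + 1 : Nat) : Int) - 1 = (m : Int) by push_cast; omega, ih]

theorem cplAux_le (ps : List (Char × Char)) : cplAux ps ≤ ps.length := by
  induction ps with
  | nil => simp [cplAux]
  | cons p t ih =>
    obtain ⟨a, b⟩ := p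
    rw [cplAux]
    split
    · simpa using ih
    · simp

theorem matchLen_le (element other : String) :
    matchLen element other ≤ max 1 element.toList.length := by
  rw [matchLen]
  split
  · omega
  · have h1 := cplAux_le (element.toList.zip other.toList)
    have h2 := List.length_zip (l₁ := element.toList) (l₂ := other.toList)
    omega

theorem take_prefix_iff (k : Nat) (l1 l2 : List Char) (hk : k ≤ l1.length) :
    (l1.take k <+: l2) ↔ k ≤ cplAux (l1.zip l2) := by
  induction k generalizing l1 l2 with
  | zero => simp
  | succ m ih =>
    cases l1 with
    | nil => simp at hk
    | cons a l1' =>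
      cases l2 with
      | nil =>
        simp only [List.zip_nil_right, List.take_succ_cons]
        constructor
        · intro h
          exact absurd (List.eq_nil_of_prefix_nil h) (by simp)
        · intro h; simp [cplAux] at h
      | cons b l2' =>
        rw [List.take_succ_cons, List.cons_prefix_cons, List.zip_cons_cons, cplAux]
        by_cases hab : a = b
        · rw [if_pos hab]
          simp only [hab, true_and]
          rw [ih l1' l2' (by simpa using hk)]
          omega
        · rw [if_neg hab]
          simp [hab]

theorem startswith_slice_eq (element : String) (k : Nat) (h1 : 1 ≤ k)
    (h2 : k ≤ max 1 element.toList.length) (o : String) :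
    PySem.Str.startswith o (PySem.Str.slice element none (some (k : Int)))
      = decide (k ≤ matchLen element o) := by
  have hsl : (PySem.Str.slice element none (some (k : Int))).toList = element.toList.take k := by
    simp [PySem.List.slice_to_natCast]
  rw [show PySem.Str.startswith o (PySem.Str.slice element none (some (k : Int)))
        = PySem.Chars.startswith o.toList (element.toList.take k) by
      rw [← hsl]; simp]
  by_cases he : element.toList = []
  · have hk1 : k = 1 := by rw [he] at h2; simp at h2; omega
    rw [he, hk1]
    simp only [List.take_nil]
    rw [show PySem.Chars.startswith o.toList [] = true from
      (PySem.Chars.startswith_iff _ _).2 (List.nil_prefix)]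
    rw [matchLen, if_pos he]
    simp
  · have hlen : element.toList.length ≠ 0 := by
      intro h0
      exact he (List.eq_nil_of_length_eq_zero h0)
    have hk : k ≤ element.toList.length := by omega
    rw [matchLen, if_neg he]
    by_cases hle : k ≤ cplAux (element.toList.zip o.toList)
    · rw [decide_eq_true hle]
      exact (PySem.Chars.startswith_iff _ _).2 ((take_prefix_iff k _ _ hk).2 hle)
    · rw [decide_eq_false hle]
      cases hsw : PySem.Chars.startswith o.toList (element.toList.take k)
      · rfl
      · exact absurd ((take_prefix_iff k _ _ hk).1 ((PySem.Chars.startswith_iff _ _).1 hsw)) hle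

theorem outerA (element : String) (elements : List String) (n : Nat)
    (hn : n ≤ max 1 element.toList.length) :
    ∀ (seen : PySem.Set String) (out : List String),
      (∀ x, x ∈ seen ↔ x ∈ elements ∧ n + 1 ≤ matchLen element x) →
      (((descN n).map (fun k => Int.ofNat k)).foldl
          (fun st i => elements.foldl (aInner (PySem.Str.slice element none (some i))) st)
          (seen, out)).2
        = out ++ (descN n).flatMap
            (fun k => (fresh PySem.Set.empty elements).filter
              (fun o => matchLen element o == k)) := by
  induction n with
  | zero => intro seen out _; simp [descN]
  | succ m ih =>
    intro seen out hseen
    rw [descN, List.map_cons, List.foldl_cons, innerA]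
    have hsw : ∀ o, PySem.Str.startswith o
        (PySem.Str.slice element none (some (Int.ofNat (m + 1))))
        = decide (m + 1 ≤ matchLen element o) := by
      intro o
      exact startswith_slice_eq element (m + 1) (by omega) hn o
    have hfilter :
        (fresh seen elements).filter
            (fun o => PySem.Str.startswith o
              (PySem.Str.slice element none (some (Int.ofNat (m + 1)))))
          = (fresh PySem.Set.empty elements).filter
              (fun o => matchLen element o == m + 1) := by
      rw [List.filter_congr (fun o _ => hsw o)]
      rw [List.filter_congr (l := fresh seen elements)
          (q := fun o => matchLen element o == m + 1) ?_]
      · refine fresh_filter_congr _ elements _ _ fun x hqx => ?_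
        have hx : matchLen element x = m + 1 := by simpa using hqx
        rw [hseen x]
        constructor
        · rintro ⟨_, hge⟩; omega
        · intro hx'; cases hx'
      · intro o ho
        rcases mem_fresh elements seen o ho with ⟨hoe, hos⟩
        have hlt : ¬ (m + 2 ≤ matchLen element o) := fun hge => hos ((hseen o).2 ⟨hoe, hge⟩)
        have : (m + 1 ≤ matchLen element o) ↔ (matchLen element o = m + 1) := by omega
        simp only [this]
        cases h : matchLen element o == m + 1
        · simpa using h
        · simpa using h
    rw [hfilter]
    rw [ih (by omega) _ _ ?_]
    · rw [List.flatMap_cons, List.append_assoc]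
    · intro x
      rw [mem_aseen, hseen x, hsw x]
      constructor
      · rintro (⟨hxe, hge⟩ | ⟨hxe, hd⟩)
        · exact ⟨hxe, by omega⟩
        · exact ⟨hxe, by simpa using hd⟩
      · rintro ⟨hxe, hge⟩
        by_cases hge2 : m + 2 ≤ matchLen element x
        · exact Or.inl ⟨hxe, hge2⟩
        · exact Or.inr ⟨hxe, by simp; omega⟩

theorem A_char (element : String) (elements : List String) :
    list_prefix_matches element elements
      = (descN (max 1 element.toList.length)).flatMap
          (fun k => (fresh PySem.Set.empty elements).filter
            (fun o => matchLen element o == k)) := by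
  rw [list_prefix_matches]
  have hlen : max 1 (PySem.Str.len element) = ((max 1 element.toList.length : Nat) : Int) := by
    have : PySem.Str.len element = (element.toList.length : Int) := by
      simp [PySem.Str.len]
    rw [this]
    omega
  rw [hlen, pyRange_descN]
  rw [outerA element elements _ (le_refl _) _ _ ?_]
  · simp
  · intro x
    simp only [PySem.Set.empty]
    constructor
    · intro hx; cases hx
    · rintro ⟨_, hge⟩
      have := matchLen_le element x
      omega

-- B characterization

def bseen (element : String) : List String → PySem.Set String → PySem.Set String
  | [], seen => seen
  | o :: t, seen =>
    if PySem.Set.contains seen o then bseen element t seen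
    else bseen element t (PySem.Set.add seen o)

theorem B_fold (element : String) (xs : List String) (seen : PySem.Set String)
    (acc : List (Nat × String)) :
    xs.foldl (bStep element) (seen, acc)
      = (bseen element xs seen,
         acc ++ ((fresh seen xs).filter (fun o => decide (0 < matchLen element o))).map
           (fun o => (matchLen element o, o))) := by
  induction xs generalizing seen acc with
  | nil => simp [bseen, fresh]
  | cons o t ih =>
    rw [List.foldl_cons, bseen, fresh]
    by_cases hc : o ∈ seen
    · rw [show bStep element (seen, acc) o = (seen, acc) by
        rw [bStep, pv_contains_true hc]; simp only [reduceIte]]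
      rw [pv_contains_true hc]
      simp only [reduceIte]
      exact ih seen acc
    · rw [pv_contains_false hc]
      simp only [Bool.false_eq_true, reduceIte]
      by_cases hk : 0 < matchLen element o
      · rw [show bStep element (seen, acc) o
            = (PySem.Set.add seen o, acc ++ [(matchLen element o, o)]) by
          rw [bStep, pv_contains_false hc]
          simp only [Bool.false_eq_true, reduceIte]
          simp [hk]]
        rw [ih, List.filter_cons]
        simp only [decide_eq_true hk, reduceIte, List.map_cons, List.append_assoc,
          List.singleton_append]
      · rw [show bStep element (seen, acc) o = (PySem.Set.add seen o, acc) by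
          rw [bStep, pv_contains_false hc]
          simp only [Bool.false_eq_true, reduceIte]
          simp [hk]]
        rw [ih, List.filter_cons]
        simp only [decide_eq_false hk, Bool.false_eq_true, reduceIte]

-- stable sort into descending groups

theorem insertBy_append_of_not_before {α : Type} (before : α → α → Bool) (x : α)
    (as bs : List α) (h : ∀ a ∈ as, before x a = false) :
    PySem.List.insertBy before x (as ++ bs) = as ++ PySem.List.insertBy before x bs := by
  induction as with
  | nil => simp
  | cons a t ih =>
    rw [List.cons_append, PySem.List.insertBy, h a List.mem_cons_self]
    simp only [Bool.false_eq_true, reduceIte]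
    rw [ih fun a ha => h a (List.mem_cons_of_mem _ ha), List.cons_append]

theorem insertBy_middle {α : Type} (before : α → α → Bool) (x : α)
    (as bs : List α) (h1 : ∀ a ∈ as, before x a = false) (h2 : ∀ b ∈ bs, before x b = true) :
    PySem.List.insertBy before x (as ++ bs) = as ++ x :: bs := by
  rw [insertBy_append_of_not_before before x as bs h1]
  congr 1
  cases bs with
  | nil => rfl
  | cons b t =>
    rw [PySem.List.insertBy, h2 b List.mem_cons_self]
    simp only [reduceIte]

theorem flatMap_congr_mem {A B : Type} (l : List A) (f g : A → List B)
    (h : ∀ a ∈ l, f a = g a) : l.flatMap f = l.flatMap g := by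
  induction l with
  | nil => rfl
  | cons a t ih =>
    rw [List.flatMap_cons, List.flatMap_cons, h a List.mem_cons_self,
      ih fun a ha => h a (List.mem_cons_of_mem _ ha)]

theorem before_eq (x c : Nat × String) :
    (decide ((fun t : Nat × String => -(t.1 : Int)) x < (fun t : Nat × String => -(t.1 : Int)) c))
      = decide (c.1 < x.1) := by
  show decide ((-(x.1 : Int)) < (-(c.1 : Int))) = decide (c.1 < x.1)
  rw [decide_eq_decide]
  omega

theorem insert_grouped (ks : List Nat) (cs : List (Nat × String)) (x : Nat × String)
    (hp : ks.Pairwise (fun a b => b < a)) (hx : x.1 ∈ ks) :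
    PySem.List.insertBy (fun a b : Nat × String => decide (b.1 < a.1)) x
        (ks.flatMap (fun k => cs.filter (fun c => c.1 == k)))
      = ks.flatMap (fun k => (cs ++ [x]).filter (fun c => c.1 == k)) := by
  induction ks with
  | nil => cases hx
  | cons k ks' ih =>
    rw [List.flatMap_cons, List.flatMap_cons]
    have hpk : ∀ k' ∈ ks', k' < k := fun k' hk' => (List.pairwise_cons.1 hp).1 k' hk'
    have hmem_group : ∀ a ∈ cs.filter (fun c => c.1 == k), a.1 = k := by
      intro a ha
      have := List.of_mem_filter ha
      simpa using this
    have hmem_rest : ∀ b ∈ ks'.flatMap (fun k => cs.filter (fun c => c.1 == k)), b.1 < k := by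
      intro b hb
      rcases List.mem_flatMap.1 hb with ⟨k', hk', hbk'⟩
      have : b.1 = k' := by simpa using List.of_mem_filter hbk'
      rw [this]
      exact hpk k' hk'
    by_cases hxk : x.1 = k
    · have hgroups : ks'.flatMap (fun k => (cs ++ [x]).filter (fun c => c.1 == k))
          = ks'.flatMap (fun k => cs.filter (fun c => c.1 == k)) := by
        refine flatMap_congr_mem _ _ _ fun k' hk' => ?_
        rw [List.filter_append]
        have hxf : List.filter (fun c => c.1 == k') [x] = [] := by
          have hne : (x.1 == k') = false := by
            have := hpk k' hk'
            simp only [beq_eq_false_iff_ne]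
            omega
          simp [hne]
        rw [hxf, List.append_nil]
      rw [hgroups, List.filter_append]
      rw [show List.filter (fun c => c.1 == k) [x] = [x] by simp [hxk]]
      have := insertBy_middle (fun a b : Nat × String => decide (b.1 < a.1)) x
        (cs.filter (fun c => c.1 == k)) (ks'.flatMap (fun k => cs.filter (fun c => c.1 == k)))
        (fun a ha => by
          have := hmem_group a ha
          simp only [decide_eq_false_iff_not]
          omega)
        (fun b hb => by
          have := hmem_rest b hb
          simp only [decide_eq_true_eq]
          omega)
      rw [this]
      simp [List.append_assoc]
    · have hx' : x.1 ∈ ks' := by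
        rcases List.mem_cons.1 hx with h | h
        · exact absurd h hxk
        · exact h
      have hxlt : x.1 < k := hpk x.1 hx'
      rw [show List.filter (fun c => c.1 == k) (cs ++ [x]) = List.filter (fun c => c.1 == k) cs by
        rw [List.filter_append]
        have hne : (x.1 == k) = false := by simp [hxk]
        simp [hne]]
      rw [insertBy_append_of_not_before _ _ _ _ (fun a ha => by
        have := hmem_group a ha
        simp only [decide_eq_false_iff_not]
        omega)]
      rw [ih (List.pairwise_cons.1 hp).2 hx']

theorem sorted_grouped (L : Nat) (cs : List (Nat × String))
    (h : ∀ c ∈ cs, 1 ≤ c.1 ∧ c.1 ≤ L) :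
    PySem.List.sorted cs (fun t => -(t.1 : Int)) false
      = (descN L).flatMap (fun k => cs.filter (fun c => c.1 == k)) := by
  have hbefore : (fun a b : Nat × String =>
      decide ((fun t : Nat × String => -(t.1 : Int)) a < (fun t : Nat × String => -(t.1 : Int)) b))
      = fun a b : Nat × String => decide (b.1 < a.1) := by
    funext a b
    exact before_eq a b
  induction cs using List.reverseRecOn with
  | nil =>
    rw [PySem.List.sorted_eq_foldl_insertBy]
    simp
  | append_singleton E x ih =>
    rw [PySem.List.sorted_eq_foldl_insertBy, List.foldl_append, List.foldl_cons, List.foldl_nil,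
      ← PySem.List.sorted_eq_foldl_insertBy, hbefore]
    rw [ih fun c hc => h c (List.mem_append_left _ hc)]
    have hx := h x (List.mem_append_right _ List.mem_cons_self)
    exact insert_grouped (descN L) E x (pairwise_descN L) ((mem_descN L x.1).2 hx)

theorem B_char (element : String) (elements : List String) :
    list_prefix_matches_alt element elements
      = (descN (max 1 element.toList.length)).flatMap
          (fun k => (fresh PySem.Set.empty elements).filter
            (fun o => matchLen element o == k)) := by
  show (PySem.List.sorted
      ((elements.foldl (bStep element)
        ((PySem.Set.empty : PySem.Set String), ([] : List (Nat × String)))).2)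
      (fun t => -(t.1 : Int)) false).map (fun t => t.2) = _
  rw [B_fold, List.nil_append]
  set D := fresh (PySem.Set.empty : PySem.Set String) elements with hD
  set f := fun o => (matchLen element o, o) with hf
  have hkeys : ∀ c ∈ (D.filter (fun o => decide (0 < matchLen element o))).map f,
      1 ≤ c.1 ∧ c.1 ≤ max 1 element.toList.length := by
    intro c hc
    rcases List.mem_map.1 hc with ⟨o, ho, rfl⟩
    have h1 : 0 < matchLen element o := by simpa using List.of_mem_filter ho
    have h2 := matchLen_le element o
    simp only [hf]
    omega
  rw [sorted_grouped _ _ hkeys, List.map_flatMap]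
  refine flatMap_congr_mem _ _ _ fun k hk => ?_
  have hk1 : 1 ≤ k := ((mem_descN _ k).1 hk).1
  rw [List.filter_map, List.map_map]
  have hsnd : ((fun t : Nat × String => t.2) ∘ f) = id := by
    funext o; rfl
  rw [hsnd, List.map_id]
  have hpf : ((fun c : Nat × String => c.1 == k) ∘ f) = fun o => matchLen element o == k := by
    funext o; rfl
  rw [hpf, List.filter_filter]
  refine List.filter_congr fun o _ => ?_
  cases h : matchLen element o == k
  · simp
  · have : matchLen element o = k := by simpa using h
    simp [this]
    omega

theorem final (element : String) (elements : List String) :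
    list_prefix_matches element elements = list_prefix_matches_alt element elements := by
  rw [A_char, B_char]

-- ===== VERDICT (by name: the statement is the Claim_ definition above) =====
theorem list_prefix_matches_spec : Claim_equal_list_prefix_matches := by
  intro element elements _
  exact final element elements
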